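-- pv_equiv track=rewrite | github.com/Alvaropz/Python_problems_BinarySearch | 1. Easy/unobstructed_buildings/unobstructed_buildings.py | unobstructed_buildings
-- ===== SOURCE A (Python) =====
-- def unobstructed_buildings(heights):
--     if heights:
--         index_list = []
--         max_height = heights[-1]
--         for index, high in enumerate(reversed(heights)):
--             if high > max_height:
--                 index_list.append(len(heights)-index-1)
--                 max_height = high
--         index_list.append(len(heights)-1)
--         return sorted(index_list)
--     return []
-- ===== SOURCE B (Python) =====
-- def unobstructed_buildings(heights):
--     # Two staged passes: build the full table of strict suffix maxima, then
--     # collect qualifying indices left-to-right (already ascending: no sort).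
--     smax = []
--     cur = None
--     for h in reversed(heights):
--         smax.append(cur)
--         cur = h if cur is None or h > cur else cur
--     smax.reverse()
--     return [i for i, h in enumerate(heights) if smax[i] is None or h > smax[i]]
-- ===== Notes on version B (the rewrite author's own statement) =====
-- stated objective: alternative
-- what changed: B replaces A's reverse-scan-collect-then-sort with two staged passes: it first builds the complete table of strict suffix maxima, then filters indices left-to-right against that table, so the output is produced in ascending order with no sort.
import Mathlib
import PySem

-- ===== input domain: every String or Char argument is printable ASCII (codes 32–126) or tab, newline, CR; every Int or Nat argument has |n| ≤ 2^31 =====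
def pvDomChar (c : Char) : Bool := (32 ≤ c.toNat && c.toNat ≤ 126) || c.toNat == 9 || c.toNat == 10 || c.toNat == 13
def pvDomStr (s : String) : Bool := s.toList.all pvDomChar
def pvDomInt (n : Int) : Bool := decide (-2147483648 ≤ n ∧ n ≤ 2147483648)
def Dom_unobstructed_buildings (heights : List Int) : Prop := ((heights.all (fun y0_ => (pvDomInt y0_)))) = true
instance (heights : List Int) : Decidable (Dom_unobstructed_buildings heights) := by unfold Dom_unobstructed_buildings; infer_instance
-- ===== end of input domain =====

-- B builds the full table of strict suffix maxima first, then filters indices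
-- left-to-right against it, instead of A's reverse scan collecting-then-sorting (alternative).

-- ===== PORT A =====
def unobstructed_buildings (heights : List Int) : List Int :=
  if heights = [] then []
  else
    match PySem.List.pyGet? heights (-1) with
    | none => []  -- unreachable: heights ≠ []
    | some mx0 =>
      let st :=
        (PySem.List.enumerate heights.reverse 0).foldl
          (fun (st : List Int × Int) p =>
            if p.2 > st.2 then (st.1 ++ [(heights.length : Int) - p.1 - 1], p.2) else st)
          ([], mx0)
      PySem.List.sorted (st.1 ++ [(heights.length : Int) - 1]) (fun x => x) false

-- ===== PORT B =====
def unobstructed_buildings_alt (heights : List Int) : List Int :=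
  -- pass 1: smax table (entry recorded before the running max is updated)
  let st :=
    heights.reverse.foldl
      (fun (st : List (Option Int) × Option Int) h =>
        (st.1 ++ [st.2],
         match st.2 with
         | none => some h
         | some m => if h > m then some h else some m))
      ([], none)
  let smax := st.1.reverse
  -- pass 2: the comprehension over enumerate(heights)
  (PySem.List.enumerate heights 0).filterMap
    (fun p =>
      match PySem.List.pyGet? smax p.1 with
      | none => none  -- unreachable: index in range
      | some none => some p.1
      | some (some m) => if p.2 > m then some p.1 else none)

-- ===== PRECONDITION & SPEC =====
def Spec_unobstructed_buildings (heights : List Int) (out : List Int) : Prop := out = unobstructed_buildings_alt heights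
instance (heights : List Int) (out : List Int) : Decidable (Spec_unobstructed_buildings heights out) := by unfold Spec_unobstructed_buildings; infer_instance

-- ===== CLAIM (what is proved, stated in full; the proofs are below) =====
def Claim_equal_unobstructed_buildings : Prop := ∀ (heights : List Int), Dom_unobstructed_buildings heights → Spec_unobstructed_buildings heights (unobstructed_buildings heights)

-- ===== LEMMAS AND PROOFS =====

def pvCast (i : Nat) : Int := i

theorem pvCast_eq (i : Nat) : pvCast i = (i : Int) := rfl

-- 'max or None' update, as both programs perform it
def pvOmax (c : Option Int) (h : Int) : Option Int :=
  match c with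
  | none => some h
  | some m => if h > m then some h else some m

-- strict suffix maximum of a list (None when empty)
def pvSufmax (l : List Int) : Option Int := l.foldr (fun h c => pvOmax c h) none

-- index i is unobstructed: taller than everything strictly to its right
def pvOk (hs : List Int) (i : Nat) : Bool :=
  match pvSufmax (hs.drop (i + 1)) with
  | none => true
  | some m => decide (hs.getD i 0 > m)

-- the canonical answer: qualifying indices in ascending order
def pvIdxs (hs : List Int) : List Int :=
  ((List.range hs.length).filter (pvOk hs)).map pvCast

theorem pvSufmax_cons (h : Int) (t : List Int) :
    pvSufmax (h :: t) = pvOmax (pvSufmax t) h := by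
  simp [pvSufmax]

theorem pv_filterMap_if {α β : Type} (p : α → Bool) (f : α → β) (l : List α) :
    l.filterMap (fun x => if p x then some (f x) else none) = (l.filter p).map f := by
  induction l with
  | nil => rfl
  | cons a t ih =>
    by_cases hp : p a <;> simp [List.filterMap_cons, List.filter_cons, hp, ih]

-- ---------- A side ----------

theorem pvA_loop (heights : List Int) :
    ∀ (m : Nat), m ≤ heights.length → ∀ (mx : Int),
    pvSufmax (heights.drop m) = some mx → ∀ (acc : List Int),
    ∃ mx',
      (PySem.List.enumerate (heights.take m).reverse ((heights.length : Int) - m)).foldl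
        (fun (st : List Int × Int) p =>
          if p.2 > st.2 then (st.1 ++ [(heights.length : Int) - p.1 - 1], p.2) else st)
        (acc, mx)
      = (acc ++ (((List.range m).filter (pvOk heights)).map pvCast).reverse, mx') := by
  intro m
  induction m with
  | zero =>
    intro _ mx _ acc
    exact ⟨mx, by simp [PySem.List.enumerate_nil]⟩
  | succ m ih =>
    intro hm mx hsuf acc
    have hmlt : m < heights.length := by omega
    have htake : heights.take (m + 1) = heights.take m ++ [heights[m]] := by
      rw [List.take_add_one]; simp [List.getElem?_eq_getElem hmlt]
    have henum :
        PySem.List.enumerate (heights.take (m + 1)).reverse ((heights.length : Int) - (m + 1))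
          = ((heights.length : Int) - (m + 1), heights[m]) ::
            PySem.List.enumerate (heights.take m).reverse ((heights.length : Int) - m) := by
      rw [htake, List.reverse_append]
      simp only [List.reverse_cons, List.reverse_nil, List.nil_append, List.singleton_append,
        PySem.List.enumerate_cons]
      congr 2
      omega
    have hdrop : heights.drop m = heights[m] :: heights.drop (m + 1) :=
      List.drop_eq_getElem_cons hmlt
    have hok : pvOk heights m = decide (heights[m] > mx) := by
      simp [pvOk, hsuf, List.getElem?_eq_getElem hmlt]
    have hsuf' : pvSufmax (heights.drop m)
        = some (if heights[m] > mx then heights[m] else mx) := by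
      rw [hdrop, pvSufmax_cons, hsuf]
      simp only [pvOmax]
      split_ifs <;> rfl
    have hfilter :
        (((List.range (m + 1)).filter (pvOk heights)).map pvCast).reverse
          = (if pvOk heights m then [(m : Int)] else []) ++
            (((List.range m).filter (pvOk heights)).map pvCast).reverse := by
      rw [List.range_succ, List.filter_append]
      by_cases h : pvOk heights m <;> simp [h, pvCast_eq]
    have hidx : (heights.length : Int) - ((heights.length : Int) - ((m : Nat) + 1)) - 1 = (m : Int) := by
      omega
    by_cases hc : heights[m] > mx
    · obtain ⟨mx', hrec⟩ := ih (le_of_lt hmlt) heights[m]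
        (by rw [hsuf']; simp [hc]) (acc ++ [(m : Int)])
      refine ⟨mx', ?_⟩
      push_cast
      rw [henum]
      simp only [List.foldl_cons, if_pos hc, hidx]
      rw [hrec, hfilter]
      simp [hok, hc]
    · obtain ⟨mx', hrec⟩ := ih (le_of_lt hmlt) mx
        (by rw [hsuf']; simp [hc]) acc
      refine ⟨mx', ?_⟩
      push_cast
      rw [henum]
      simp only [List.foldl_cons, if_neg hc]
      rw [hrec, hfilter]
      simp [hok, hc]

theorem pvA_eq_idxs (heights : List Int) (hne : heights ≠ []) :
    unobstructed_buildings heights = pvIdxs heights := by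
  unfold unobstructed_buildings
  simp only [if_neg hne]
  have hlen : 1 ≤ heights.length := by
    cases heights with
    | nil => exact absurd rfl hne
    | cons a t => simp
  rw [PySem.List.pyGet?_neg_one]
  obtain ⟨last, hlast⟩ := List.getLast?_isSome.mpr hne |> Option.isSome_iff_exists.mp
  rw [hlast]
  have hsplit : heights = heights.take (heights.length - 1) ++ [last] := by
    conv_lhs => rw [← List.take_append_getLast? heights]
    simp [hlast]
  have hrev : heights.reverse = last :: (heights.take (heights.length - 1)).reverse := by
    conv_lhs => rw [hsplit]
    simp
  have hdrop : heights.drop (heights.length - 1) = [last] := by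
    have h1 : heights.length - 1 < heights.length := by omega
    rw [List.drop_eq_getElem_cons h1, List.drop_eq_nil_of_le (by omega)]
    have hg : heights.getLast? = heights[heights.length - 1]? := List.getLast?_eq_getElem?
    rw [hlast, List.getElem?_eq_getElem h1] at hg
    simp at hg
    simp [hg]
  have hsufl : pvSufmax (heights.drop (heights.length - 1)) = some last := by
    rw [hdrop]; simp [pvSufmax, pvOmax]
  obtain ⟨mx', hfold⟩ := pvA_loop heights (heights.length - 1) (by omega) last hsufl []
  have hstart : ((heights.length : Int) - (heights.length - 1 : Nat)) = 1 := by
    push_cast [hlen]; omega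
  have hAfold :
      (PySem.List.enumerate heights.reverse 0).foldl
        (fun (st : List Int × Int) p =>
          if p.2 > st.2 then (st.1 ++ [(heights.length : Int) - p.1 - 1], p.2) else st)
        ([], last)
      = ((((List.range (heights.length - 1)).filter (pvOk heights)).map pvCast).reverse, mx') := by
    rw [hrev, PySem.List.enumerate_cons]
    simp only [List.foldl_cons, if_neg (lt_irrefl last)]
    rw [show (0 : Int) + 1 = ((heights.length : Int) - (heights.length - 1 : Nat)) from by omega]
    simpa using hfold
  simp only [hAfold]
  -- the sorted result is the ascending filter list
  have hoklast : pvOk heights (heights.length - 1) = true := by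
    have : heights.drop (heights.length - 1 + 1) = [] := by
      apply List.drop_eq_nil_of_le; omega
    simp [pvOk, this, pvSufmax]
  set M := ((List.range (heights.length - 1)).filter (pvOk heights)).map pvCast with hM
  have hMpw : M.Pairwise (· < ·) := by
    rw [hM]
    refine List.pairwise_map.mpr ?_
    exact (List.pairwise_lt_range.filter _).imp
      (by intro a b h; simp only [pvCast_eq]; exact_mod_cast h)
  have hMlt : ∀ x ∈ M, x < (heights.length : Int) - 1 := by
    intro x hx
    rw [hM] at hx
    obtain ⟨i, hi, rfl⟩ := List.mem_map.mp hx
    have := List.mem_range.mp (List.mem_filter.mp hi).1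
    simp only [pvCast_eq]
    omega
  have hpwlt : (M ++ [(heights.length : Int) - 1]).Pairwise (fun a b => a < b) := by
    rw [List.pairwise_append]
    exact ⟨hMpw, by simp, fun x hx y hy => by simp at hy; subst hy; exact hMlt x hx⟩
  have hperm : (M ++ [(heights.length : Int) - 1]).Perm (M.reverse ++ [(heights.length : Int) - 1]) :=
    List.Perm.append_right _ (List.reverse_perm M).symm
  rw [PySem.List.sorted_eq_of_perm_of_pairwise_lt (M.reverse ++ [(heights.length : Int) - 1])
    (M ++ [(heights.length : Int) - 1]) (fun x => x) hperm (by simpa using hpwlt)]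
  -- and pvIdxs splits the same way
  have hIdxs : pvIdxs heights = M ++ [(heights.length : Int) - 1] := by
    have hsplitR : List.range heights.length
        = List.range (heights.length - 1) ++ [heights.length - 1] := by
      conv_lhs => rw [show heights.length = (heights.length - 1) + 1 from by omega]
      rw [List.range_succ]
    unfold pvIdxs
    rw [hsplitR, List.filter_append, List.map_append, hM]
    congr 1
    simp [hoklast, pvCast_eq]
    omega
  rw [hIdxs]

-- ---------- B side ----------

-- the smax entries produced by pass 1, structurally
def pvTb : List Int → Option Int → List (Option Int)
  | [], _ => []
  | h :: t, c => c :: pvTb t (pvOmax c h)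

def pvUb : List Int → Option Int → Option Int
  | [], c => c
  | h :: t, c => pvUb t (pvOmax c h)

theorem pvB_fold (l : List Int) :
    ∀ (acc : List (Option Int)) (c : Option Int),
    l.foldl
      (fun (st : List (Option Int) × Option Int) h =>
        (st.1 ++ [st.2],
         match st.2 with
         | none => some h
         | some m => if h > m then some h else some m))
      (acc, c) = (acc ++ pvTb l c, pvUb l c) := by
  induction l with
  | nil => intro acc c; simp [pvTb, pvUb]
  | cons h t ih =>
    intro acc c
    simp only [List.foldl_cons]
    rw [ih]
    simp [pvTb, pvUb, pvOmax]

theorem pvTb_length (l : List Int) : ∀ c, (pvTb l c).length = l.length := by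
  induction l with
  | nil => intro c; rfl
  | cons h t ih => intro c; simp [pvTb, ih]

theorem pvTb_getElem (l : List Int) :
    ∀ (c : Option Int) (k : Nat) (hk : k < l.length),
    (pvTb l c)[k]'(by rw [pvTb_length]; exact hk) = (l.take k).foldl pvOmax c := by
  induction l with
  | nil => intro c k hk; simp at hk
  | cons h t ih =>
    intro c k hk
    cases k with
    | zero => simp [pvTb]
    | succ k =>
      simp only [pvTb, List.getElem_cons_succ, List.take_succ_cons, List.foldl_cons]
      exact ih (pvOmax c h) k (by simpa using hk)

theorem pv_smax_get (heights : List Int) (i : Nat) (hi : i < heights.length) :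
    ((pvTb heights.reverse none).reverse)[i]'(by
        rw [List.length_reverse, pvTb_length, List.length_reverse]; exact hi)
      = pvSufmax (heights.drop (i + 1)) := by
  rw [List.getElem_reverse]
  simp only [pvTb_length, List.length_reverse]
  rw [pvTb_getElem heights.reverse none (heights.length - 1 - i)
    (by rw [List.length_reverse]; omega)]
  have htake : heights.reverse.take (heights.length - 1 - i) = (heights.drop (i + 1)).reverse := by
    rw [List.take_reverse]
    congr 2
    omega
  rw [htake, List.foldl_reverse]
  rfl

theorem pvB_eq_idxs (heights : List Int) :
    unobstructed_buildings_alt heights = pvIdxs heights := by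
  unfold unobstructed_buildings_alt
  rw [pvB_fold]
  simp only [List.nil_append]
  set S := (pvTb heights.reverse none).reverse with hS
  have hSlen : S.length = heights.length := by
    rw [hS, List.length_reverse, pvTb_length, List.length_reverse]
  have hcongr :
      (PySem.List.enumerate heights 0).filterMap
        (fun p =>
          match PySem.List.pyGet? S p.1 with
          | none => none
          | some none => some p.1
          | some (some m) => if p.2 > m then some p.1 else none)
      = (PySem.List.enumerate heights 0).filterMap
        (fun p => if pvOk heights p.1.toNat then some p.1 else none) := by
    apply List.filterMap_congr
    intro p hp
    obtain ⟨k, hk, rfl⟩ := (PySem.List.mem_enumerate_iff _ _ _).mp hp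
    have hk' : ((0 : Int) + k).toNat = k := by omega
    have hget : PySem.List.pyGet? S ((0 : Int) + k) = some (S[k]'(by omega)) := by
      have : ((0 : Int) + k) = (k : Int) := by omega
      rw [this, PySem.List.pyGet?_natCast]
      simp [List.getElem?_eq_getElem (by omega : k < S.length)]
    rw [hget, hk']
    have hSk : S[k]'(by omega) = pvSufmax (heights.drop (k + 1)) := pv_smax_get heights k hk
    rw [hSk]
    unfold pvOk
    rcases hm : pvSufmax (heights.drop (k + 1)) with _ | m
    · simp
    · simp [List.getElem?_eq_getElem hk]
  rw [hcongr]
  have hfst :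
      (PySem.List.enumerate heights 0).filterMap
        (fun p => if pvOk heights p.1.toNat then some p.1 else none)
      = ((PySem.List.enumerate heights 0).map Prod.fst).filterMap
        (fun i => if pvOk heights i.toNat then some i else none) := by
    rw [List.filterMap_map]
    rfl
  rw [hfst, PySem.List.map_fst_enumerate]
  have hrange : PySem.List.pyRange 0 (0 + (heights.length : Int)) 1
      = (List.range heights.length).map pvCast := by
    rw [PySem.List.pyRange_one]
    simp [pvCast_eq]
  rw [hrange, List.filterMap_map]
  have hcomp : ((fun i => if pvOk heights i.toNat then some i else none) ∘ pvCast)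
      = (fun k : Nat => if pvOk heights k then some (pvCast k) else none) := by
    funext k
    simp [Function.comp, pvCast_eq]
  rw [hcomp, pv_filterMap_if (pvOk heights) pvCast]
  rfl

-- ===== VERDICT (by name: the statement is the Claim_ definition above) =====
theorem unobstructed_buildings_spec : Claim_equal_unobstructed_buildings := by
  intro heights _
  unfold Spec_unobstructed_buildings
  by_cases hne : heights = []
  · subst hne; rfl
  · rw [pvA_eq_idxs heights hne, pvB_eq_idxs heights]
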